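-- pv_equiv track=rewrite | github.com/JohnSunny21/python-daily-coding | FreeCodeCamp/CodingQ/SmallestGap.py | smallest_gap
-- ===== SOURCE A (Python) =====
-- def smallest_gap(s):
--     min_gap = float('inf')
--     result = ""
--
--     # Dictionary to store first occurence of each character
--
--     seen = {}
--
--     for i, ch in enumerate(s):
--         if ch in seen:
--             # Calculate gap length
--
--             gap_len = i - seen[ch] - 1
--             if gap_len < min_gap:
--                 min_gap = gap_len
--                 result = s[seen[ch]+1: i] # substring between the two identicaal chars
--
--         # Always update the last index
--         seen[ch] = i
--
--     return result
-- ===== SOURCE B (Python) =====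
-- def smallest_gap(s):
--     positions = {}
--     for i, ch in enumerate(s):
--         positions.setdefault(ch, []).append(i)
--     candidates = [(cur - prev - 1, cur, prev)
--                   for idxs in positions.values()
--                   for prev, cur in zip(idxs, idxs[1:])]
--     if not candidates:
--         return ""
--     _, cur, prev = min(candidates)
--     return s[prev + 1:cur]
-- ===== Notes on version B (the rewrite author's own statement) =====
-- stated objective: alternative
-- what changed: Replaces A's single stateful scan (last-seen dict with a running minimum updated in place) by a two-phase pipeline: build a char->all-indices dict, materialise an explicit list of (gap, end, start) candidate triples from consecutive index pairs, and pick the tuple-lexicographic minimum, which reproduces A's strict-improvement tie-break (smallest gap, then earliest ending index).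
import Mathlib
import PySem

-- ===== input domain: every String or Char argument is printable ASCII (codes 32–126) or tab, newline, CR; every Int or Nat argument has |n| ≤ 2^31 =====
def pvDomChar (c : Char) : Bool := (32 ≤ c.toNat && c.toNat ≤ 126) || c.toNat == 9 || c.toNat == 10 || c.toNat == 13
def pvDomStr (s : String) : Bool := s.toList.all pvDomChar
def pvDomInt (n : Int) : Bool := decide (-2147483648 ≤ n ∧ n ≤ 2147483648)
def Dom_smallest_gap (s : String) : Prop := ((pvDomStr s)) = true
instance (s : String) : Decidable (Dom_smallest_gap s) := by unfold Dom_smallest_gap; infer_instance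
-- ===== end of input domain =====

-- B replaces A's single stateful scan (last-seen dict + running min) by an index-listing dict,
-- an explicit candidate list of (gap, cur, prev) triples and one tuple-min selection; objective: alternative decomposition.

-- ===== PORT A =====
-- fold body of A's 'for i, ch in enumerate(s)' loop (state: seen dict, min_gap as Option Int for float('inf'), result)
def sgStepA (cs : List Char) (st : PySem.Dict Char Int × Option Int × List Char) (p : Int × Char) :
    PySem.Dict Char Int × Option Int × List Char :=
  let st' :=
    match st.1.get? p.2 with
    | some j =>
      let gapLen := p.1 - j - 1
      match st.2.1 with
      | none => (some gapLen, PySem.List.slice cs (some (j + 1)) (some p.1))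
      | some g =>
        if gapLen < g then (some gapLen, PySem.List.slice cs (some (j + 1)) (some p.1))
        else (st.2.1, st.2.2)
    | none => (st.2.1, st.2.2)
  (st.1.insert p.2 p.1, st')

def smallest_gap (s : String) : String :=
  let cs := s.toList
  let fin := (PySem.List.enumerate cs 0).foldl (sgStepA cs) (PySem.Dict.empty, none, [])
  String.ofList fin.2.2

-- ===== PORT B =====
-- Python's lexicographic '<' on 3-tuples of ints
def tripLt (a b : Int × Int × Int) : Bool :=
  decide (a.1 < b.1 ∨ (a.1 = b.1 ∧ (a.2.1 < b.2.1 ∨ (a.2.1 = b.2.1 ∧ a.2.2 < b.2.2))))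

def smallest_gap_alt (s : String) : String :=
  let cs := s.toList
  -- positions: char -> list of all indices (setdefault(ch, []).append(i))
  let positions := (PySem.List.enumerate cs 0).foldl
    (fun (d : PySem.Dict Char (List Int)) p => d.modify p.2 [] (· ++ [p.1]))
    PySem.Dict.empty
  -- candidates: (cur - prev - 1, cur, prev) for consecutive pairs of each index list
  let candidates := positions.values.flatMap (fun idxs =>
    (idxs.zip (PySem.List.slice idxs (some 1) none)).map (fun pr => (pr.2 - pr.1 - 1, pr.2, pr.1)))
  match candidates with
  | [] => ""
  | c :: rest =>
    -- min(candidates): keep the first tuple-lexicographically minimal element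
    let best := rest.foldl (fun b t => if tripLt t b then t else b) c
    String.ofList (PySem.List.slice cs (some (best.2.2 + 1)) (some best.2.1))

-- ===== PRECONDITION & SPEC =====
def Spec_smallest_gap (s : String) (out : String) : Prop := out = smallest_gap_alt s
instance (s : String) (out : String) : Decidable (Spec_smallest_gap s out) := by unfold Spec_smallest_gap; infer_instance

-- ===== CLAIM (what is proved, stated in full; the proofs are below) =====
def Claim_equal_smallest_gap : Prop := ∀ (s : String), Dom_smallest_gap s → Spec_smallest_gap s (smallest_gap s)

-- ===== LEMMAS AND PROOFS =====

-- index of the last occurrence of ch in l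
def lastIdx : List Char → Char → Option Nat
  | [], _ => none
  | c :: t, ch =>
    match lastIdx t ch with
    | some j => some (j + 1)
    | none => if c = ch then some 0 else none

-- t is a candidate triple (gap, cur, prev) of cs restricted to cur < n
def Cand (cs : List Char) (n : Nat) (t : Int × Int × Int) : Prop :=
  ∃ (p c : Nat) (ch : Char), t = ((c : Int) - (p : Int) - 1, (c : Int), (p : Int)) ∧
    p < c ∧ c < n ∧ cs[p]? = some ch ∧ cs[c]? = some ch ∧
    ∀ j, p < j → j < c → cs[j]? ≠ some ch

def InvSeen (cs : List Char) (k : Nat) (seen : PySem.Dict Char Int) : Prop :=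
  ∀ ch : Char, seen.get? ch = (lastIdx (cs.take k) ch).map (fun j => (j : Int))

def InvRes (cs : List Char) (k : Nat) : Option Int × List Char → Prop
  | (none, res) => res = [] ∧ ∀ t, ¬ Cand cs k t
  | (some g, res) => ∃ p c : Nat, Cand cs k (g, (c : Int), (p : Int)) ∧
      res = (cs.drop (p + 1)).take (c - p - 1) ∧
      ∀ u, Cand cs k u → g < u.1 ∨ (g = u.1 ∧ (c : Int) ≤ u.2.1)

-- ---- lastIdx facts ----
lemma lastIdx_none (l : List Char) (ch : Char) (h : lastIdx l ch = none) :
    ∀ j : Nat, l[j]? ≠ some ch := by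
  induction l with
  | nil => intro j; simp
  | cons c t ih =>
    revert h
    cases hlt : lastIdx t ch with
    | some p => simp [lastIdx, hlt]
    | none =>
      simp only [lastIdx, hlt]
      intro h j
      have hc : ¬ c = ch := by by_contra hcc; simp [hcc] at h
      cases j with
      | zero => simpa using hc
      | succ j => simpa using ih hlt j

lemma lastIdx_spec (l : List Char) (ch : Char) :
    ∀ p : Nat, lastIdx l ch = some p →
    p < l.length ∧ l[p]? = some ch ∧ ∀ j, p < j → j < l.length → l[j]? ≠ some ch := by
  induction l with
  | nil => intro p h; simp [lastIdx] at h
  | cons c t ih =>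
    intro p
    cases hlt : lastIdx t ch with
    | some q =>
      simp only [lastIdx, hlt]
      intro h
      obtain rfl : q + 1 = p := by simpa using h
      obtain ⟨h1, h2, h3⟩ := ih q hlt
      refine ⟨by simpa using h1, by simpa using h2, ?_⟩
      intro j hj1 hj2
      cases j with
      | zero => omega
      | succ j =>
        simp only [List.getElem?_cons_succ]
        exact h3 j (by omega) (by simpa using hj2)
    | none =>
      simp only [lastIdx, hlt]
      intro h
      have hc : c = ch ∧ p = 0 := by
        by_cases hcc : c = ch <;> simp [hcc] at h <;> simp [hcc, h.symm]
      obtain ⟨rfl, rfl⟩ := hc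
      refine ⟨by simp, by simp, ?_⟩
      intro j hj1 hj2
      cases j with
      | zero => omega
      | succ j => simpa using lastIdx_none t c hlt j

lemma lastIdx_append_singleton (l : List Char) (x ch : Char) :
    lastIdx (l ++ [x]) ch = if ch = x then some l.length else lastIdx l ch := by
  induction l with
  | nil =>
    by_cases hx : ch = x
    · simp [lastIdx, hx]
    · simp only [List.nil_append, lastIdx, List.length_nil, if_neg hx]
      have : ¬ x = ch := fun h => hx h.symm
      simp [this]
  | cons c t ih =>
    simp only [List.cons_append, lastIdx, ih]
    by_cases hx : ch = x
    · simp [hx]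
    · simp only [if_neg hx]

-- ---- Cand facts ----
lemma Cand_mono (cs : List Char) (k : Nat) (t : Int × Int × Int) (h : Cand cs k t) :
    Cand cs (k + 1) t := by
  obtain ⟨p, c, ch, h1, h2, h3, h4⟩ := h
  exact ⟨p, c, ch, h1, h2, by omega, h4⟩

lemma Cand_succ_none (cs : List Char) (k : Nat) (x : Char) (hx : cs[k]? = some x)
    (h : lastIdx (cs.take k) x = none) (t : Int × Int × Int) :
    Cand cs (k + 1) t ↔ Cand cs k t := by
  constructor
  · rintro ⟨p, c, ch, h1, h2, h3, h4, h5, h6⟩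
    refine ⟨p, c, ch, h1, h2, ?_, h4, h5, h6⟩
    rcases Nat.lt_succ_iff_lt_or_eq.mp h3 with hlt | rfl
    · exact hlt
    · exfalso
      obtain rfl : ch = x := by rw [hx] at h5; injection h5 with hh; exact hh.symm
      have hp := lastIdx_none _ _ h p
      rw [List.getElem?_take_of_lt h2] at hp
      exact hp h4
  · exact Cand_mono cs k t

lemma Cand_succ_some (cs : List Char) (k : Nat) (x : Char) (hx : cs[k]? = some x)
    (p : Nat) (h : lastIdx (cs.take k) x = some p) (t : Int × Int × Int) :
    Cand cs (k + 1) t ↔ Cand cs k t ∨ t = ((k : Int) - (p : Int) - 1, (k : Int), (p : Int)) := by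
  have hk : k ≤ cs.length := by
    obtain ⟨hk', -⟩ := List.getElem?_eq_some_iff.mp hx
    omega
  have hlen : (cs.take k).length = k := by simp [hk]
  obtain ⟨hp1, hp2, hp3⟩ := lastIdx_spec (cs.take k) x p h
  rw [hlen] at hp1
  rw [List.getElem?_take_of_lt hp1] at hp2
  constructor
  · rintro ⟨q, c, ch, h1, h2, h3, h4, h5, h6⟩
    rcases Nat.lt_succ_iff_lt_or_eq.mp h3 with hlt | rfl
    · exact Or.inl ⟨q, c, ch, h1, h2, hlt, h4, h5, h6⟩
    · right
      obtain rfl : ch = x := by rw [hx] at h5; injection h5 with hh; exact hh.symm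
      obtain rfl : q = p := by
        by_contra hne
        rcases Nat.lt_or_ge q p with hqp | hqp
        · exact h6 p hqp hp1 hp2
        · have hqp' : p < q := by omega
          have := hp3 q hqp' (by omega)
          rw [List.getElem?_take_of_lt h2] at this
          exact this h4
      rw [h1]
  · rintro (hc | rfl)
    · exact Cand_mono cs k t hc
    · refine ⟨p, k, x, rfl, hp1, by omega, hp2, hx, ?_⟩
      intro j hj1 hj2 hj3
      have := hp3 j hj1 (by omega)
      rw [List.getElem?_take_of_lt hj2] at this
      exact this hj3

lemma Cand_inj (cs : List Char) (n : Nat) (t u : Int × Int × Int)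
    (ht : Cand cs n t) (hu : Cand cs n u) (hc : t.2.1 = u.2.1) : t = u := by
  obtain ⟨p, c, ch, rfl, h2, h3, h4, h5, h6⟩ := ht
  obtain ⟨p', c', ch', rfl, h2', h3', h4', h5', h6'⟩ := hu
  simp only at hc
  obtain rfl : c = c' := by omega
  obtain rfl : ch = ch' := by rw [h5] at h5'; injection h5'
  obtain rfl : p = p' := by
    by_contra hne
    rcases Nat.lt_or_ge p p' with hpp | hpp
    · exact h6 p' hpp h2' h4'
    · exact h6' p (by omega) h2 h4
  rfl

-- ---- A-side loop invariant ----
lemma A_loop (cs : List Char) (suf : List Char) :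
    ∀ (k : Nat) (st : PySem.Dict Char Int × Option Int × List Char),
    cs.drop k = suf → k ≤ cs.length → InvSeen cs k st.1 → InvRes cs k st.2 →
    InvRes cs cs.length (((PySem.List.enumerate suf (k : Int)).foldl (sgStepA cs) st).2) := by
  induction suf with
  | nil =>
    intro k st hdrop hk hseen hres
    have hkl : k = cs.length := by
      have := List.drop_eq_nil_iff.mp hdrop
      omega
    rw [hkl] at hres
    simpa [PySem.List.enumerate_nil] using hres
  | cons x rest ih =>
    rintro k ⟨seen, mg, res⟩ hdrop hk hseen hres
    have hx : cs[k]? = some x := by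
      have h0 : (cs.drop k)[0]? = some x := by rw [hdrop]; rfl
      rwa [List.getElem?_drop] at h0
    have hkl : k < cs.length := by
      obtain ⟨hk', -⟩ := List.getElem?_eq_some_iff.mp hx
      exact hk'
    have hrest : cs.drop (k + 1) = rest := by
      rw [← List.tail_drop, hdrop]
      rfl
    have htake : cs.take (k + 1) = cs.take k ++ [x] := by
      rw [List.take_succ, hx]; rfl
    have hlen : (cs.take k).length = k := by simp [Nat.le_of_lt hkl]
    rw [PySem.List.enumerate_cons, List.foldl_cons]
    have hcast : (k : Int) + 1 = ((k + 1 : Nat) : Int) := by push_cast; ring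
    rw [hcast]
    -- InvSeen for the updated dict
    have hseen' : InvSeen cs (k + 1) (sgStepA cs (seen, mg, res) ((k : Int), x)).1 := by
      intro ch
      simp only [sgStepA]
      rw [PySem.Dict.get?_insert, htake, lastIdx_append_singleton, hlen]
      by_cases hch : ch = x
      · simp [hch]
      · simp [hch, hseen ch]
    have hres' : InvRes cs (k + 1) (sgStepA cs (seen, mg, res) ((k : Int), x)).2 := by
      have hgx := hseen x
      cases hli : lastIdx (cs.take k) x with
      | none =>
        have hgx2 : seen.get? x = none := by rw [hgx, hli]; rfl
        cases mg with
        | none =>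
          simp only [sgStepA, hgx2, InvRes]
          simp only [InvRes] at hres
          exact ⟨hres.1, fun t => by rw [Cand_succ_none cs k x hx hli t]; exact hres.2 t⟩
        | some g =>
          simp only [sgStepA, hgx2, InvRes]
          simp only [InvRes] at hres
          obtain ⟨p0, c0, hc0, hr0, hmin0⟩ := hres
          exact ⟨p0, c0, Cand_mono cs k _ hc0, hr0,
            fun u hu => hmin0 u ((Cand_succ_none cs k x hx hli u).mp hu)⟩
      | some p =>
        have hgx2 : seen.get? x = some ((p : Int)) := by rw [hgx, hli]; rfl
        have hnewc : Cand cs (k + 1) ((k : Int) - (p : Int) - 1, (k : Int), (p : Int)) :=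
          (Cand_succ_some cs k x hx p hli _).mpr (Or.inr rfl)
        have hslice : PySem.List.slice cs (some ((p : Int) + 1)) (some (k : Int)) =
            (cs.drop (p + 1)).take (k - p - 1) := by
          have hc : (p : Int) + 1 = ((p + 1 : Nat) : Int) := by push_cast; ring
          rw [hc, PySem.List.slice_natCast]
          congr 1
        cases mg with
        | none =>
          simp only [sgStepA, hgx2, InvRes]
          simp only [InvRes] at hres
          refine ⟨p, k, hnewc, hslice, ?_⟩
          intro u hu
          rcases (Cand_succ_some cs k x hx p hli u).mp hu with hold | rfl
          · exact absurd hold (hres.2 u)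
          · exact Or.inr ⟨rfl, le_refl _⟩
        | some g =>
          simp only [InvRes] at hres
          obtain ⟨p0, c0, hc0, hr0, hmin0⟩ := hres
          by_cases hlt : (k : Int) - (p : Int) - 1 < g
          · simp only [sgStepA, hgx2, if_pos hlt, InvRes]
            refine ⟨p, k, hnewc, hslice, ?_⟩
            intro u hu
            rcases (Cand_succ_some cs k x hx p hli u).mp hu with hold | rfl
            · rcases hmin0 u hold with h | ⟨h, -⟩ <;> exact Or.inl (by omega)
            · exact Or.inr ⟨rfl, le_refl _⟩
          · simp only [sgStepA, hgx2, if_neg hlt, InvRes]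
            refine ⟨p0, c0, Cand_mono cs k _ hc0, hr0, ?_⟩
            intro u hu
            rcases (Cand_succ_some cs k x hx p hli u).mp hu with hold | rfl
            · exact hmin0 u hold
            · have hc0k : c0 < k := by
                obtain ⟨p', c', ch', heq, -, hck, -⟩ := hc0
                have hcc : c' = c0 := by
                  have := congrArg (fun t => t.2.1) heq
                  simpa using this.symm
                omega
              simp only
              rcases lt_or_eq_of_le (not_lt.mp hlt) with h | h
              · exact Or.inl h
              · exact Or.inr ⟨h, by omega⟩
    exact ih (k + 1) _ hrest hkl hseen' hres'

-- ---- tripLt order facts ----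
lemma tripLt_irrefl (a : Int × Int × Int) : tripLt a a = false := by
  simp [tripLt]

lemma tripLt_asymm (a b : Int × Int × Int) (h : tripLt a b = true) : tripLt b a = false := by
  simp only [tripLt, decide_eq_true_eq] at h
  simp only [tripLt, decide_eq_false_iff_not]
  omega

lemma tripLt_total (a b : Int × Int × Int) (h : a ≠ b) : tripLt a b = true ∨ tripLt b a = true := by
  simp only [tripLt, decide_eq_true_eq]
  by_contra hc
  rw [not_or] at hc
  apply h
  obtain ⟨h1, h2⟩ := hc
  rw [not_or] at *
  obtain ⟨a1, a2, a3⟩ := a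
  obtain ⟨b1, b2, b3⟩ := b
  simp only [Prod.mk.injEq]
  simp only [not_lt, not_and, not_or] at h1 h2
  omega

lemma tripLt_trans (a b c : Int × Int × Int) (h1 : tripLt a b = true) (h2 : tripLt b c = true) :
    tripLt a c = true := by
  simp only [tripLt, decide_eq_true_eq] at h1 h2 ⊢
  omega

lemma tripLt_of_lt_or (a b : Int × Int × Int)
    (h : a.1 < b.1 ∨ (a.1 = b.1 ∧ a.2.1 < b.2.1)) : tripLt a b = true := by
  simp only [tripLt, decide_eq_true_eq]
  omega

lemma tripLe_trans (a b c : Int × Int × Int) (h1 : tripLt a b = true ∨ a = b)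
    (h2 : tripLt b c = true ∨ b = c) : tripLt a c = true ∨ a = c := by
  rcases h1 with h1 | rfl
  · rcases h2 with h2 | rfl
    · exact Or.inl (tripLt_trans a b c h1 h2)
    · exact Or.inl h1
  · exact h2

lemma tripLt_of_le (a b : Int × Int × Int) (h : tripLt a b = true ∨ a = b) :
    tripLt b a = false := by
  rcases h with h | rfl
  · exact tripLt_asymm a b h
  · exact tripLt_irrefl a

-- ---- min fold characterization ----
lemma foldl_min_spec (l : List (Int × Int × Int)) :
    ∀ b : Int × Int × Int,
    (l.foldl (fun b t => if tripLt t b then t else b) b = b ∨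
      l.foldl (fun b t => if tripLt t b then t else b) b ∈ l) ∧
    (tripLt (l.foldl (fun b t => if tripLt t b then t else b) b) b = true ∨
      l.foldl (fun b t => if tripLt t b then t else b) b = b) ∧
    ∀ u ∈ l, tripLt u (l.foldl (fun b t => if tripLt t b then t else b) b) = false := by
  induction l with
  | nil => intro b; exact ⟨Or.inl rfl, Or.inr rfl, by simp⟩
  | cons t rest ih =>
    intro b
    simp only [List.foldl_cons]
    obtain ⟨ih1, ih2, ih3⟩ := ih (if tripLt t b then t else b)
    have hle_b : tripLt (if tripLt t b then t else b) b = true ∨ (if tripLt t b then t else b) = b := by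
      by_cases h : tripLt t b = true
      · simp only [if_pos h]; exact Or.inl h
      · rw [if_neg h]; exact Or.inr rfl
    have hle_t : tripLt (if tripLt t b then t else b) t = true ∨ (if tripLt t b then t else b) = t := by
      by_cases h : tripLt t b = true
      · rw [if_pos h]; exact Or.inr rfl
      · simp only [if_neg h]
        by_cases heq : b = t
        · exact Or.inr heq
        · rcases tripLt_total b t heq with h2 | h2
          · exact Or.inl h2
          · rw [h2] at h; exact absurd rfl h
    refine ⟨?_, ?_, ?_⟩
    · rcases ih1 with h | h
      · rw [h]
        by_cases hc : tripLt t b = true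
        · simp [hc]
        · simp [hc]
      · exact Or.inr (List.mem_cons_of_mem t h)
    · exact tripLe_trans _ _ _ ih2 hle_b
    · intro u hu
      rcases List.mem_cons.mp hu with rfl | hu'
      · exact tripLt_of_le _ _ (tripLe_trans _ _ _ ih2 hle_t)
      · exact ih3 u hu'

-- ---- B-side helpers ----
def occsC (cs : List Char) (ch : Char) : List Int :=
  ((PySem.List.enumerate cs 0).filter (fun p => p.2 == ch)).map (·.1)

lemma posDict_getD (cs : List Char) (ch : Char) :
    ((PySem.List.enumerate cs 0).foldl
      (fun (d : PySem.Dict Char (List Int)) p => d.modify p.2 [] (· ++ [p.1]))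
      PySem.Dict.empty).getD ch [] = occsC cs ch := by
  have h : (List.foldl (fun (d : PySem.Dict Char (List Int)) p => d.modify p.2 [] (· ++ [p.1]))
        PySem.Dict.empty (PySem.List.enumerate cs 0))
      = List.foldl (fun (d : PySem.Dict Char (List Int)) q => d.modify q.1 [] (· ++ [q.2]))
        PySem.Dict.empty ((PySem.List.enumerate cs 0).map (fun p => (p.2, p.1))) := by
    rw [List.foldl_map]
  rw [h, PySem.Dict.getD_foldl_modify_append]
  simp [occsC, List.filter_map, Function.comp_def]

lemma posDict_values (cs : List Char) :
    ((PySem.List.enumerate cs 0).foldl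
      (fun (d : PySem.Dict Char (List Int)) p => d.modify p.2 [] (· ++ [p.1]))
      PySem.Dict.empty).values = (PySem.Set.ofList cs).map (fun ch => occsC cs ch) := by
  have hnd : ((PySem.List.enumerate cs 0).foldl
      (fun (d : PySem.Dict Char (List Int)) p => d.modify p.2 [] (· ++ [p.1]))
      PySem.Dict.empty).keys.Nodup := by
    apply PySem.Dict.nodup_keys_foldl_modify_key (key := fun (p : Int × Char) => p.2)
      (f := fun (_ : PySem.Dict Char (List Int)) (p : Int × Char) => (· ++ [p.1]))
    simp
  have hkeys : ((PySem.List.enumerate cs 0).foldl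
      (fun (d : PySem.Dict Char (List Int)) p => d.modify p.2 [] (· ++ [p.1]))
      PySem.Dict.empty).keys = PySem.Set.ofList cs := by
    rw [PySem.Dict.keys_foldl_modify_key (key := fun (p : Int × Char) => p.2)
      (f := fun (_ : PySem.Dict Char (List Int)) (p : Int × Char) => (· ++ [p.1]))]
    simp [PySem.List.map_snd_enumerate, PySem.Set.update_nil_left]
  rw [PySem.Dict.values_eq_map_keys _ hnd [], hkeys]
  exact List.map_congr_left (fun ch _ => posDict_getD cs ch)

lemma occs_pairwise (cs : List Char) (ch : Char) : (occsC cs ch).Pairwise (· < ·) := by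
  unfold occsC
  rw [List.pairwise_map]
  exact List.Pairwise.sublist List.filter_sublist (PySem.List.pairwise_lt_enumerate cs 0)

lemma mem_occs (cs : List Char) (ch : Char) (x : Int) :
    x ∈ occsC cs ch ↔ ∃ j : Nat, x = (j : Int) ∧ cs[j]? = some ch := by
  unfold occsC
  simp only [List.mem_map, List.mem_filter, PySem.List.mem_enumerate_iff]
  constructor
  · rintro ⟨p, ⟨⟨k, hk, rfl⟩, hpch⟩, rfl⟩
    refine ⟨k, by simp, ?_⟩
    simp only [beq_iff_eq] at hpch
    rw [List.getElem?_eq_some_iff]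
    exact ⟨hk, hpch⟩
  · rintro ⟨j, rfl, hj⟩
    obtain ⟨hjl, hje⟩ := List.getElem?_eq_some_iff.mp hj
    exact ⟨((j : Int), ch), ⟨⟨j, hjl, by simp [hje]⟩, by simp⟩, rfl⟩

lemma mem_zip_tail (l : List Int) (u : Int × Int) :
    u ∈ l.zip l.tail ↔ ∃ i : Nat, ∃ h : i + 1 < l.length, u = (l[i], l[i + 1]) := by
  constructor
  · intro hu
    obtain ⟨i, hi, hgi⟩ := List.mem_iff_getElem.mp hu
    have hlen : i + 1 < l.length := by
      have := List.length_zip (l₁ := l) (l₂ := l.tail)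
      rw [this] at hi
      have := List.length_tail (l := l)
      omega
    refine ⟨i, hlen, ?_⟩
    rw [← hgi, List.getElem_zip, List.getElem_tail]
  · rintro ⟨i, h, rfl⟩
    apply List.mem_iff_getElem.mpr
    have hlen : i < (l.zip l.tail).length := by
      rw [List.length_zip, List.length_tail]
      omega
    exact ⟨i, hlen, by rw [List.getElem_zip, List.getElem_tail]⟩

-- ---- B-side candidate list characterization ----
lemma candB_mem (cs : List Char) (t : Int × Int × Int) :
    (t ∈ ((PySem.List.enumerate cs 0).foldl
        (fun (d : PySem.Dict Char (List Int)) p => d.modify p.2 [] (· ++ [p.1]))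
        PySem.Dict.empty).values.flatMap (fun idxs =>
          (idxs.zip (PySem.List.slice idxs (some 1) none)).map
            (fun pr => (pr.2 - pr.1 - 1, pr.2, pr.1)))) ↔ Cand cs cs.length t := by
  rw [posDict_values]
  simp only [PySem.List.slice_from_one, List.mem_flatMap, List.mem_map]
  constructor
  · rintro ⟨idxs, ⟨ch, hch, rfl⟩, pr, hpr, rfl⟩
    obtain ⟨i, hilen, rfl⟩ := (mem_zip_tail _ _).mp hpr
    have mono := List.pairwise_iff_getElem.mp (occs_pairwise cs ch)
    obtain ⟨pa, hpa, hpach⟩ := (mem_occs cs ch _).mp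
      (List.getElem_mem (l := occsC cs ch) (n := i) (by omega))
    obtain ⟨ca, hca, hcach⟩ := (mem_occs cs ch _).mp
      (List.getElem_mem (l := occsC cs ch) (n := i + 1) hilen)
    have hab : (occsC cs ch)[i] < (occsC cs ch)[i + 1] := mono i (i + 1) (by omega) hilen (by omega)
    rw [hpa, hca] at hab ⊢
    refine ⟨pa, ca, ch, rfl, by exact_mod_cast hab, ?_, hpach, hcach, ?_⟩
    · obtain ⟨h, -⟩ := List.getElem?_eq_some_iff.mp hcach; exact h
    · intro j hj1 hj2 hjch
      have hjmem : ((j : Nat) : Int) ∈ occsC cs ch := (mem_occs cs ch _).mpr ⟨j, rfl, hjch⟩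
      obtain ⟨m, hm, hmj⟩ := List.mem_iff_getElem.mp hjmem
      rcases Nat.lt_trichotomy m (i + 1) with hmi | hmi | hmi
      · rcases Nat.lt_or_ge m i with hmi' | hmi'
        · have hlt := mono m i (by omega) (by omega) hmi'
          rw [hmj, hpa] at hlt
          omega
        · have heq : m = i := by omega
          subst heq
          rw [hpa] at hmj
          omega
      · subst hmi
        rw [hca] at hmj
        omega
      · have hlt := mono (i + 1) m (by omega) hm hmi
        rw [hmj, hca] at hlt
        omega
  · rintro ⟨p, c, ch, rfl, hpc, hcn, hpch, hcch, hbet⟩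
    have hchcs : ch ∈ cs := by
      obtain ⟨h, he⟩ := List.getElem?_eq_some_iff.mp hcch
      exact he ▸ List.getElem_mem h
    have hpl : ((p : Nat) : Int) ∈ occsC cs ch := (mem_occs cs ch _).mpr ⟨p, rfl, hpch⟩
    have hcl : ((c : Nat) : Int) ∈ occsC cs ch := (mem_occs cs ch _).mpr ⟨c, rfl, hcch⟩
    obtain ⟨i, hi, hie⟩ := List.mem_iff_getElem.mp hpl
    obtain ⟨m, hm, hme⟩ := List.mem_iff_getElem.mp hcl
    have mono := List.pairwise_iff_getElem.mp (occs_pairwise cs ch)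
    have him : i < m := by
      rcases Nat.lt_trichotomy i m with h | h | h
      · exact h
      · exfalso; subst h; rw [hie] at hme; omega
      · exfalso
        have hlt := mono m i (by omega) hi h
        rw [hie, hme] at hlt
        omega
    have hm1 : m = i + 1 := by
      by_contra hne
      have hmid : i + 1 < m := by omega
      obtain ⟨j, hje, hjch⟩ := (mem_occs cs ch _).mp
        (List.getElem_mem (l := occsC cs ch) (n := i + 1) (by omega))
      have hbtw := mono i (i + 1) (by omega) (by omega) (by omega)
      have hbtw2 := mono (i + 1) m (by omega) hm hmid
      rw [hje, hie] at hbtw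
      rw [hje, hme] at hbtw2
      exact hbet j (by omega) (by omega) hjch
    subst hm1
    refine ⟨occsC cs ch, ⟨ch, ?_, rfl⟩, ((p : Int), (c : Int)), ?_, ?_⟩
    · have := PySem.Set.mem_ofList (xs := cs) (y := ch)
      exact this.mpr hchcs
    · exact (mem_zip_tail _ _).mpr ⟨i, by omega, by rw [hie, hme]⟩
    · rfl

lemma slice_nat (cs : List Char) (p c : Nat) :
    PySem.List.slice cs (some ((p : Int) + 1)) (some (c : Int)) =
      (cs.drop (p + 1)).take (c - p - 1) := by
  have hc : (p : Int) + 1 = ((p + 1 : Nat) : Int) := by push_cast; ring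
  rw [hc, PySem.List.slice_natCast]
  congr 1

-- ===== VERDICT (by name: the statement is the Claim_ definition above) =====
theorem smallest_gap_spec : Claim_equal_smallest_gap := by
  intro s _hdom
  simp only [Spec_smallest_gap, smallest_gap, smallest_gap_alt]
  set cs := s.toList with hcs
  have hseen0 : InvSeen cs 0 PySem.Dict.empty := by
    intro ch
    simp [lastIdx, PySem.Dict.get?_empty]
  have hres0 : InvRes cs 0 (none, ([] : List Char)) := by
    refine ⟨rfl, ?_⟩
    rintro t ⟨p, c, ch, -, -, h3, -⟩
    omega
  have hA := A_loop cs cs 0 (PySem.Dict.empty, none, []) (by simp) (by simp) hseen0 hres0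
  simp only [Nat.cast_zero] at hA
  rcases hfold : ((PySem.List.enumerate cs 0).foldl (sgStepA cs) (PySem.Dict.empty, none, [])).2
    with ⟨mg, res⟩
  rw [hfold] at hA
  cases mg with
  | none =>
    obtain ⟨hres1, hres2⟩ := hA
    cases hcand : (((PySem.List.enumerate cs 0).foldl
        (fun (d : PySem.Dict Char (List Int)) p => d.modify p.2 [] (· ++ [p.1]))
        PySem.Dict.empty).values.flatMap (fun idxs =>
          (idxs.zip (PySem.List.slice idxs (some 1) none)).map
            (fun pr => (pr.2 - pr.1 - 1, pr.2, pr.1)))) with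
    | nil =>
      rw [hres1]
    | cons c0 rest =>
      exfalso
      have hc0 : c0 ∈ (c0 :: rest) := List.mem_cons_self
      exact hres2 c0 ((candB_mem cs c0).mp (hcand ▸ hc0))
  | some g =>
    obtain ⟨p, c, hc, hr, hmin⟩ := hA
    have htin := (candB_mem cs (g, (c : Int), (p : Int))).mpr hc
    cases hcand : (((PySem.List.enumerate cs 0).foldl
        (fun (d : PySem.Dict Char (List Int)) p => d.modify p.2 [] (· ++ [p.1]))
        PySem.Dict.empty).values.flatMap (fun idxs =>
          (idxs.zip (PySem.List.slice idxs (some 1) none)).map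
            (fun pr => (pr.2 - pr.1 - 1, pr.2, pr.1)))) with
    | nil =>
      exact absurd (hcand ▸ htin) (List.not_mem_nil)
    | cons c0 rest =>
      obtain ⟨sp1, sp2, sp3⟩ := foldl_min_spec rest c0
      have hmmem : rest.foldl (fun b t => if tripLt t b then t else b) c0 ∈ c0 :: rest := by
        rcases sp1 with h | h
        · rw [h]; exact List.mem_cons_self
        · exact List.mem_cons_of_mem _ h
      have hmin_all : ∀ u ∈ c0 :: rest,
          tripLt u (rest.foldl (fun b t => if tripLt t b then t else b) c0) = false := by
        intro u hu
        rcases List.mem_cons.mp hu with rfl | hu'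
        · exact tripLt_of_le _ _ sp2
        · exact sp3 u hu'
      have hmCand : Cand cs cs.length (rest.foldl (fun b t => if tripLt t b then t else b) c0) :=
        (candB_mem cs _).mp (hcand ▸ hmmem)
      have hmeq : rest.foldl (fun b t => if tripLt t b then t else b) c0 = (g, (c : Int), (p : Int)) := by
        by_cases hcc : (rest.foldl (fun b t => if tripLt t b then t else b) c0).2.1 = (c : Int)
        · exact Cand_inj cs cs.length _ _ hmCand hc hcc
        · exfalso
          have hmin2 := hmin _ hmCand
          have htlt : tripLt (g, (c : Int), (p : Int))
              (rest.foldl (fun b t => if tripLt t b then t else b) c0) = true := by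
            apply tripLt_of_lt_or
            simp only at hmin2 ⊢
            rcases hmin2 with h | ⟨h1, h2⟩
            · exact Or.inl h
            · exact Or.inr ⟨h1, lt_of_le_of_ne h2 (Ne.symm hcc)⟩
          have hfalse := hmin_all _ (hcand ▸ htin)
          rw [htlt] at hfalse
          cases hfalse
      show String.ofList res = String.ofList (PySem.List.slice cs
        (some ((rest.foldl (fun b t => if tripLt t b then t else b) c0).2.2 + 1))
        (some (rest.foldl (fun b t => if tripLt t b then t else b) c0).2.1))
      rw [hmeq]
      show String.ofList res = String.ofList (PySem.List.slice cs (some ((p : Int) + 1)) (some (c : Int)))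
      rw [slice_nat, hr]
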